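-- pv_equiv track=rewrite | github.com/Digital-Humanities-Jena/zenodo-toolbox | excel_tools.py | convert_keywords_to_list
-- ===== SOURCE A (Python) =====
-- from typing import Any, Dict, List, Optional, Set, Tuple, Union
--
-- def convert_keywords_to_list(
--     keywords_str: str, custom_config: Dict[str, Dict[str, Dict[str, List[str]]]] = {}
-- ) -> List[str]:
--     """
--     Converts a string of keywords into a sorted list of unique keywords.
--
--     Args:
--         keywords_str: A string containing keywords.
--         custom_config: A configuration dictionary with split characters.
--
--     Returns:
--         [0] A sorted list of unique keywords.
--     """
--     config = custom_config if custom_config else {}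
--
--     split_chars = config["misc"]["split_characters"]["keywords"]
--     unique_items = set()
--
--     # Start with the first split character
--     groups = keywords_str.split(split_chars[0])
--
--     for group in groups:
--         # If there's a second split character, split again
--         if len(split_chars) > 1:
--             items = group.split(split_chars[1])
--         else:
--             items = [group]
--
--         stripped_items = [item.strip() for item in items if item.strip()]
--         unique_items.update(stripped_items)
--
--     return sorted(list(unique_items))
-- ===== SOURCE B (Python) =====
-- def convert_keywords_to_list(keywords_str, custom_config={}):
--     config = custom_config if custom_config else {}
--     split_chars = config["misc"]["split_characters"]["keywords"]
--     outer = split_chars[0]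
--     inner = split_chars[1] if len(split_chars) > 1 else None
--     result = []
--     remaining = keywords_str
--     done = False
--     while not done:
--         i = remaining.find(outer)
--         if i == -1:
--             group, done = remaining, True
--         else:
--             group, remaining = remaining[:i], remaining[i + len(outer):]
--         if inner is None:
--             result = _insert(result, group)
--         else:
--             g = group
--             j = g.find(inner)
--             while j != -1:
--                 result = _insert(result, g[:j])
--                 g = g[j + len(inner):]
--                 j = g.find(inner)
--             result = _insert(result, g)
--     return result
--
-- def _insert(result, token):
--     # keep `result` sorted and duplicate-free: binary-search the position, skip duplicates
--     t = token.strip()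
--     if not t:
--         return result
--     lo, hi = 0, len(result)
--     while lo < hi:
--         mid = (lo + hi) // 2
--         if result[mid] < t:
--             lo = mid + 1
--         else:
--             hi = mid
--     if lo < len(result) and result[lo] == t:
--         return result
--     result.insert(lo, t)
--     return result
-- ===== Notes on version B (the rewrite author's own statement) =====
-- stated objective: alternative
-- what changed: B drops A's split()/set/sorted() pipeline entirely: it tokenizes by a streaming str.find scan that cuts groups and items out of the string, and maintains the sorted duplicate-free result incrementally by binary-searched ordered insertion, so no set is built and no final sort runs.
import Mathlib
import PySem

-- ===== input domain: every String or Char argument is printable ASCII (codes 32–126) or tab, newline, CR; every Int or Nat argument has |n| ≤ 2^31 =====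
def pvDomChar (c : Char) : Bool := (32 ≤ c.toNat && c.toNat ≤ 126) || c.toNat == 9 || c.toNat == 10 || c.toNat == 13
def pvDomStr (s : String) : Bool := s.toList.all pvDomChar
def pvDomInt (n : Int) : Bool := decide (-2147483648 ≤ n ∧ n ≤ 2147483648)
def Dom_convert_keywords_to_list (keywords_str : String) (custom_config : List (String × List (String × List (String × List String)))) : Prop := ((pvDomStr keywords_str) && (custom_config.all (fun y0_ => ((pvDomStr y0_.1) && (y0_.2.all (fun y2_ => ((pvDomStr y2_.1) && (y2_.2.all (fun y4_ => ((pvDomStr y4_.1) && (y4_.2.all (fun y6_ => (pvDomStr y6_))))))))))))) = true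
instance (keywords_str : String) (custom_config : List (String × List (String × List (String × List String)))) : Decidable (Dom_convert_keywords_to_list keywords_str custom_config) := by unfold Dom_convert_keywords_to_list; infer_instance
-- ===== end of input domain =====

-- B replaces A's staged split/set/sorted pipeline by one streaming find-based scan that cuts
-- tokens out of the string itself and maintains a sorted duplicate-free result list by
-- binary-searched ordered insertion: no split(), no set, no final sort. (objective: alternative)

-- shared config access (`config["misc"]["split_characters"]["keywords"]`), used by both ports and Pre_
def pvCfgSplitChars (custom_config : List (String × List (String × List (String × List String)))) : Option (List String) :=
  ((PySem.Dict.mk custom_config).get? "misc").bind (fun d2 =>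
    ((PySem.Dict.mk d2).get? "split_characters").bind (fun d3 =>
      (PySem.Dict.mk d3).get? "keywords"))

-- ===== PORT A =====
def convert_keywords_to_list (keywords_str : String) (custom_config : List (String × List (String × List (String × List String)))) : List String :=
  -- config = custom_config if custom_config else {}
  let config := if custom_config.isEmpty then [] else custom_config
  -- KeyError on a missing key is excluded by Pre_ (the .getD [] is never reached under Pre_)
  let split_chars := (pvCfgSplitChars config).getD []
  -- groups = keywords_str.split(split_chars[0]); IndexError / ValueError('empty separator') excluded by Pre_
  let groups := (PySem.Str.split? keywords_str (PySem.List.pyGetD split_chars 0 "")).getD []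
  let unique_items := groups.foldl (fun (s : PySem.Set String) (g : String) =>
      let items := if 1 < split_chars.length
        then (PySem.Str.split? g (PySem.List.pyGetD split_chars 1 "")).getD []
        else [g]
      PySem.Set.update s ((items.map PySem.Str.strip).filter (fun t => t ≠ ""))) PySem.Set.empty
  PySem.List.sorted unique_items (fun x => x)

-- ===== PORT B =====
-- the `while lo < hi` binary-search loop of Source B's _insert (in-range reads; getD is the in-range read)
def pvBS (res : List String) (t : String) (lo hi : Nat) : Nat :=
  if _h : lo < hi then
    let mid := (lo + hi) / 2
    if res.getD mid "" < t then pvBS res t (mid + 1) hi else pvBS res t lo mid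
  else lo
termination_by hi - lo
decreasing_by all_goals omega

-- Source B's _insert: strip, skip empties, binary-search the slot, skip duplicates, splice in
-- (`result.insert(lo, t)` at 0 ≤ lo ≤ len is exactly take/cons/drop)
def pvInsert (res : List String) (token : String) : List String :=
  let t := PySem.Str.strip token
  if t = "" then res
  else
    let lo := pvBS res t 0 res.length
    if lo < res.length ∧ res.getD lo "" = t then res
    else res.take lo ++ t :: res.drop lo

-- Source B's inner `while j != -1` loop; fuel = g.length + 1 bounds the loop (each cut removes ≥ 1 char)
def pvScanInner (inner : List Char) : Nat → List Char → List String → List String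
  | 0, _, res => res
  | fuel + 1, g, res =>
    let j := PySem.Chars.find g inner
    if j = -1 then pvInsert res (String.ofList g)
    else pvScanInner inner fuel (g.drop (j.toNat + inner.length)) (pvInsert res (String.ofList (g.take j.toNat)))

-- Source B's outer `while not done` loop
def pvScanOuter (outer : List Char) (inner? : Option (List Char)) : Nat → List Char → List String → List String
  | 0, _, res => res
  | fuel + 1, s, res =>
    let i := PySem.Chars.find s outer
    let group := if i = -1 then s else s.take i.toNat
    let res' := match inner? with
      | none => pvInsert res (String.ofList group)
      | some inner => pvScanInner inner (group.length + 1) group res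
    if i = -1 then res'
    else pvScanOuter outer inner? fuel (s.drop (i.toNat + outer.length)) res'

def convert_keywords_to_list_alt (keywords_str : String) (custom_config : List (String × List (String × List (String × List String)))) : List String :=
  let config := if custom_config.isEmpty then [] else custom_config
  let split_chars := (pvCfgSplitChars config).getD []
  let outer := (PySem.List.pyGetD split_chars 0 "").toList
  let inner? := if 1 < split_chars.length then some (PySem.List.pyGetD split_chars 1 "").toList else none
  pvScanOuter outer inner? (keywords_str.toList.length + 1) keywords_str.toList []

-- ===== PRECONDITION & SPEC =====
-- Pre_ excludes exactly the inputs on which the Python A raises: a config missing one of the three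
-- nested keys (KeyError; also the empty config dict), an empty split-character list (IndexError),
-- and an empty first (or, when present and used, second) separator (ValueError).
def Pre_convert_keywords_to_list (keywords_str : String) (custom_config : List (String × List (String × List (String × List String)))) : Prop :=
  let sc := (pvCfgSplitChars (if custom_config.isEmpty then [] else custom_config)).getD []
  sc ≠ [] ∧ sc.getD 0 "" ≠ "" ∧ (1 < sc.length → sc.getD 1 "" ≠ "")
instance (keywords_str : String) (custom_config : List (String × List (String × List (String × List String)))) : Decidable (Pre_convert_keywords_to_list keywords_str custom_config) := by unfold Pre_convert_keywords_to_list; infer_instance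

def pvWitness_convert_keywords_to_list : String × (List (String × List (String × List (String × List String)))) :=
  ("a, b; c", [("misc", [("split_characters", [("keywords", [",", ";"])])])])

def Spec_convert_keywords_to_list (keywords_str : String) (custom_config : List (String × List (String × List (String × List String)))) (out : List String) : Prop := out = convert_keywords_to_list_alt keywords_str custom_config
instance (keywords_str : String) (custom_config : List (String × List (String × List (String × List String)))) (out : List String) : Decidable (Spec_convert_keywords_to_list keywords_str custom_config out) := by unfold Spec_convert_keywords_to_list; infer_instance

-- ===== CLAIM (what is proved, stated in full; the proofs are below) =====
def Claim_equal_convert_keywords_to_list : Prop := ∀ (keywords_str : String) (custom_config : List (String × List (String × List (String × List String)))), Dom_convert_keywords_to_list keywords_str custom_config → Pre_convert_keywords_to_list keywords_str custom_config → Spec_convert_keywords_to_list keywords_str custom_config (convert_keywords_to_list keywords_str custom_config)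

-- ===== LEMMAS AND PROOFS =====

lemma pv_go_nil (sep cur : List Char) (fuel : Nat) (acc : List (List Char)) :
    PySem.Chars.splitOn.go sep (fuel + 1) [] cur acc = (cur.reverse :: acc).reverse := rfl
lemma pv_go_cons (sep : List Char) (fuel : Nat) (c : Char) (rest cur : List Char) (acc : List (List Char)) :
    PySem.Chars.splitOn.go sep (fuel + 1) (c :: rest) cur acc =
      if sep.isPrefixOf (c :: rest)
        then PySem.Chars.splitOn.go sep fuel (List.drop sep.length (c :: rest)) [] (cur.reverse :: acc)
        else PySem.Chars.splitOn.go sep fuel rest (c :: cur) acc := rfl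
lemma pv_splitOn_def (sep l : List Char) :
    PySem.Chars.splitOn l sep = PySem.Chars.splitOn.go sep (l.length + 1) l [] [] := rfl

lemma pv_go_acc (sep : List Char) (hsep : sep ≠ []) :
    ∀ n l, List.length l = n → ∀ (fuel : Nat) (cur : List Char) (acc : List (List Char)), n < fuel →
      PySem.Chars.splitOn.go sep fuel l cur acc =
        acc.reverse ++ (cur.reverse ++ (PySem.Chars.splitOn l sep).headI) :: (PySem.Chars.splitOn l sep).tail := by
  intro n
  induction n using Nat.strong_induction_on with
  | _ n ih =>
    intro l hl fuel cur acc hfuel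
    have hslen : 1 ≤ sep.length := by
      cases sep with | nil => exact absurd rfl hsep | cons a b => simp
    match fuel with
    | 0 => omega
    | fuel + 1 =>
      match l with
      | [] =>
          rw [pv_go_nil]
          simp [PySem.Chars.splitOn, pv_go_nil]
      | c :: rest =>
          have hn : n = rest.length + 1 := by simp at hl; omega
          rw [pv_go_cons]
          by_cases hp : sep.isPrefixOf (c :: rest)
          · rw [if_pos hp]
            have hdlen : (List.drop sep.length (c :: rest)).length < n := by simp; omega
            have hconsd : PySem.Chars.splitOn (List.drop sep.length (c :: rest)) sep =
                (PySem.Chars.splitOn (List.drop sep.length (c :: rest)) sep).headI ::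
                  (PySem.Chars.splitOn (List.drop sep.length (c :: rest)) sep).tail := by
              conv_lhs => rw [pv_splitOn_def, ih _ hdlen _ rfl _ [] [] (by omega)]
              simp
            have hsplit : PySem.Chars.splitOn (c :: rest) sep =
                [] :: PySem.Chars.splitOn (List.drop sep.length (c :: rest)) sep := by
              rw [pv_splitOn_def]
              rw [show (c :: rest).length + 1 = (rest.length + 1) + 1 from by simp, pv_go_cons, if_pos hp]
              rw [ih _ hdlen _ rfl (rest.length + 1) [] [[].reverse] (by omega)]
              conv_rhs => rw [hconsd]
              simp
            rw [ih _ hdlen _ rfl fuel [] (cur.reverse :: acc) (by omega)]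
            rw [hsplit]
            simp
            exact hconsd.symm
          · rw [if_neg hp]
            have hrlen : rest.length < n := by omega
            have hsplit : PySem.Chars.splitOn (c :: rest) sep =
                (c :: (PySem.Chars.splitOn rest sep).headI) :: (PySem.Chars.splitOn rest sep).tail := by
              rw [pv_splitOn_def]
              rw [show (c :: rest).length + 1 = (rest.length + 1) + 1 from by simp, pv_go_cons, if_neg hp]
              have hconsr : PySem.Chars.splitOn rest sep =
                  (PySem.Chars.splitOn rest sep).headI :: (PySem.Chars.splitOn rest sep).tail := by
                conv_lhs => rw [pv_splitOn_def, ih rest.length hrlen rest rfl _ [] [] (by omega)]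
                simp
              rw [ih rest.length hrlen rest rfl (rest.length + 1) [c] [] (by omega)]
              simp
            rw [ih rest.length hrlen rest rfl fuel (c :: cur) acc (by omega)]
            rw [hsplit]
            simp

lemma pv_splitOn_cons (sep : List Char) (hsep : sep ≠ []) (l : List Char) :
    PySem.Chars.splitOn l sep = (PySem.Chars.splitOn l sep).headI :: (PySem.Chars.splitOn l sep).tail := by
  conv_lhs => rw [pv_splitOn_def, pv_go_acc sep hsep l.length l rfl (l.length + 1) [] [] (by omega)]
  simp

lemma pv_find_eq_of (l sep : List Char) (m : Nat) (h1 : sep <+: List.drop m l)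
    (h2 : ∀ i < m, ¬ sep <+: List.drop i l) : PySem.Chars.find l sep = (m : Int) := by
  have hin : PySem.Chars.isIn sep l = true :=
    (PySem.Chars.exists_prefix_drop_iff_isIn sep l).mp ⟨m, h1⟩
  have hpos : 0 ≤ PySem.Chars.find l sep :=
    (PySem.Chars.find_nonneg_iff l sep).mpr ((PySem.Chars.isIn_iff_infix sep l).mp hin)
  obtain ⟨hf1, hf2⟩ := PySem.Chars.find_spec hpos
  have : (PySem.Chars.find l sep).toNat = m := by
    rcases lt_trichotomy (PySem.Chars.find l sep).toNat m with h | h | h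
    · exact absurd hf1 (h2 _ h)
    · exact h
    · exact absurd h1 (hf2 m h)
  omega

lemma pv_find_neg_iff (l sep : List Char) :
    PySem.Chars.find l sep = -1 ↔ ¬ ∃ j, sep <+: List.drop j l := by
  rw [PySem.Chars.find_eq_neg_one_iff]
  constructor
  · intro h ⟨j, hj⟩
    exact h ((PySem.Chars.isIn_iff_infix sep l).mp
      ((PySem.Chars.exists_prefix_drop_iff_isIn sep l).mp ⟨j, hj⟩))
  · intro h hinf
    have := (PySem.Chars.exists_prefix_drop_iff_isIn sep l).mpr
    exact h ((PySem.Chars.exists_prefix_drop_iff_isIn sep l).symm.mp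
      ((PySem.Chars.isIn_iff_infix sep l).mpr hinf))

lemma pv_splitOn_step (sep : List Char) (hsep : sep ≠ []) (l : List Char) :
    PySem.Chars.splitOn l sep =
      if PySem.Chars.find l sep = -1 then [l]
      else List.take (PySem.Chars.find l sep).toNat l ::
        PySem.Chars.splitOn (List.drop ((PySem.Chars.find l sep).toNat + sep.length) l) sep := by
  have hslen : 1 ≤ sep.length := by
    cases sep with | nil => exact absurd rfl hsep | cons a b => simp
  induction l with
  | nil =>
      have hneg : PySem.Chars.find [] sep = -1 := by
        rw [pv_find_neg_iff]
        rintro ⟨j, hj⟩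
        simp at hj
        exact hsep hj
      rw [if_pos hneg]
      rfl
  | cons c rest ih =>
      by_cases hp : sep.isPrefixOf (c :: rest)
      · have hf : PySem.Chars.find (c :: rest) sep = ((0 : Nat) : Int) :=
          pv_find_eq_of _ _ 0 (by simpa using List.isPrefixOf_iff_prefix.mp hp) (by omega)
        rw [hf]
        rw [if_neg (by decide)]
        have hsplit : PySem.Chars.splitOn (c :: rest) sep =
            [] :: PySem.Chars.splitOn (List.drop sep.length (c :: rest)) sep := by
          rw [pv_splitOn_def]
          rw [show (c :: rest).length + 1 = (rest.length + 1) + 1 from by simp, pv_go_cons, if_pos hp]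
          rw [pv_go_acc sep hsep _ _ rfl (rest.length + 1) [] [[].reverse] (by simp; omega)]
          conv_rhs => rw [pv_splitOn_cons sep hsep]
          simp
        simpa using hsplit
      · have hnp : ¬ sep <+: (c :: rest) := fun h => hp (List.isPrefixOf_iff_prefix.mpr h)
        have hsplit : PySem.Chars.splitOn (c :: rest) sep =
            (c :: (PySem.Chars.splitOn rest sep).headI) :: (PySem.Chars.splitOn rest sep).tail := by
          rw [pv_splitOn_def]
          rw [show (c :: rest).length + 1 = (rest.length + 1) + 1 from by simp, pv_go_cons, if_neg hp]
          rw [pv_go_acc sep hsep _ _ rfl (rest.length + 1) [c] [] (by omega)]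
          simp
        by_cases hr : PySem.Chars.find rest sep = -1
        · have hneg : PySem.Chars.find (c :: rest) sep = -1 := by
            rw [pv_find_neg_iff] at hr ⊢
            rintro ⟨j, hj⟩
            match j with
            | 0 => exact hnp (by simpa using hj)
            | j + 1 => exact hr ⟨j, by simpa using hj⟩
          rw [if_pos hneg, hsplit]
          rw [ih, if_pos hr]
          simp
        · have hr0 : 0 ≤ PySem.Chars.find rest sep := by
            have := PySem.Chars.neg_one_le_find rest sep
            omega
          obtain ⟨hf1, hf2⟩ := PySem.Chars.find_spec hr0
          have hf : PySem.Chars.find (c :: rest) sep = (((PySem.Chars.find rest sep).toNat + 1 : Nat) : Int) := by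
            apply pv_find_eq_of
            · simpa using hf1
            · intro i hi
              match i with
              | 0 => exact hnp
              | i + 1 => simpa using hf2 i (by omega)
          rw [hf, if_neg (by omega), hsplit, ih, if_neg hr]
          simp only [Int.toNat_natCast, List.take_succ_cons]
          rw [show (PySem.Chars.find rest sep).toNat + 1 + sep.length
              = ((PySem.Chars.find rest sep).toNat + sep.length) + 1 from by omega]
          simp only [List.drop_succ_cons, List.headI_cons, List.tail_cons]

lemma pv_find_nil (sep : List Char) (hsep : sep ≠ []) : PySem.Chars.find [] sep = -1 := by
  rw [pv_find_neg_iff]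
  rintro ⟨j, hj⟩
  simp at hj
  exact hsep hj

lemma pv_scanInner_eq (inner : List Char) (hsep : inner ≠ []) :
    ∀ n g, List.length g = n → ∀ (fuel : Nat) (res : List String), n < fuel →
      pvScanInner inner fuel g res =
        (PySem.Chars.splitOn g inner).foldl (fun r t => pvInsert r (String.ofList t)) res := by
  have hslen : 1 ≤ inner.length := by
    cases inner with | nil => exact absurd rfl hsep | cons a b => simp
  intro n
  induction n using Nat.strong_induction_on with
  | _ n ih =>
    intro g hg fuel res hfuel
    match fuel with
    | 0 => omega
    | fuel + 1 =>
      rw [pv_splitOn_step inner hsep g]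
      by_cases hfind : PySem.Chars.find g inner = -1
      · rw [if_pos hfind]
        simp [pvScanInner, hfind]
      · rw [if_neg hfind]
        have hgne : g ≠ [] := by
          rintro rfl
          exact hfind (pv_find_nil inner hsep)
        have hglen : 1 ≤ g.length := by cases g with | nil => exact absurd rfl hgne | cons a b => simp
        have hdlen : (List.drop ((PySem.Chars.find g inner).toNat + inner.length) g).length < n := by
          simp; omega
        show (if PySem.Chars.find g inner = -1 then _ else _) = _
        rw [if_neg hfind]
        rw [ih _ hdlen _ rfl fuel _ (by omega)]
        simp

lemma pv_scanOuter_eq (outer : List Char) (inner? : Option (List Char)) (hsep : outer ≠ []) :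
    ∀ n s, List.length s = n → ∀ (fuel : Nat) (res : List String), n < fuel →
      pvScanOuter outer inner? fuel s res =
        (PySem.Chars.splitOn s outer).foldl (fun r g =>
          match inner? with
          | none => pvInsert r (String.ofList g)
          | some inner => pvScanInner inner (g.length + 1) g r) res := by
  have hslen : 1 ≤ outer.length := by
    cases outer with | nil => exact absurd rfl hsep | cons a b => simp
  intro n
  induction n using Nat.strong_induction_on with
  | _ n ih =>
    intro s hs fuel res hfuel
    match fuel with
    | 0 => omega
    | fuel + 1 =>
      rw [pv_splitOn_step outer hsep s]
      by_cases hfind : PySem.Chars.find s outer = -1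
      · rw [if_pos hfind]
        simp [pvScanOuter, hfind]
      · rw [if_neg hfind]
        have hgne : s ≠ [] := by
          rintro rfl
          exact hfind (pv_find_nil outer hsep)
        have hglen : 1 ≤ s.length := by cases s with | nil => exact absurd rfl hgne | cons a b => simp
        have hdlen : (List.drop ((PySem.Chars.find s outer).toNat + outer.length) s).length < n := by
          simp; omega
        show (if PySem.Chars.find s outer = -1 then _ else _) = _
        rw [if_neg hfind]
        rw [ih _ hdlen _ rfl fuel _ (by omega)]
        simp [hfind]

lemma pv_bs_spec (res : List String) (t : String) (hsort : res.Pairwise (· < ·)) :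
    ∀ d lo hi, hi - lo = d → lo ≤ hi → hi ≤ res.length →
      (∀ k < lo, res.getD k "" < t) → (∀ k, hi ≤ k → k < res.length → ¬ res.getD k "" < t) →
      lo ≤ pvBS res t lo hi ∧ pvBS res t lo hi ≤ hi ∧
        (∀ k < pvBS res t lo hi, res.getD k "" < t) ∧
        (∀ k, pvBS res t lo hi ≤ k → k < res.length → ¬ res.getD k "" < t) := by
  have hmono : ∀ p q, p ≤ q → q < res.length → res.getD p "" ≤ res.getD q "" := by
    intro p q hpq hq
    rcases eq_or_lt_of_le hpq with rfl | hlt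
    · exact le_refl _
    · have := List.pairwise_iff_getElem.mp hsort p q (by omega) hq hlt
      rw [List.getD_eq_getElem res "" (by omega), List.getD_eq_getElem res "" hq]
      exact le_of_lt this
  intro d
  induction d using Nat.strong_induction_on with
  | _ d ih =>
    intro lo hi hd hle hhi hlo hhi2
    unfold pvBS
    by_cases h : lo < hi
    · rw [dif_pos h]
      simp only []
      by_cases hc : res.getD ((lo + hi) / 2) "" < t
      · rw [if_pos hc]
        have hnew : ∀ k < (lo + hi) / 2 + 1, res.getD k "" < t := by
          intro k hk
          by_cases hklo : k < lo
          · exact hlo k hklo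
          · exact lt_of_le_of_lt (hmono k ((lo + hi) / 2) (by omega) (by omega)) hc
        have := ih (hi - ((lo + hi) / 2 + 1)) (by omega) ((lo + hi) / 2 + 1) hi rfl (by omega) hhi hnew hhi2
        refine ⟨by omega, this.2.1, this.2.2.1, this.2.2.2⟩
      · rw [if_neg hc]
        have hnew : ∀ k, (lo + hi) / 2 ≤ k → k < res.length → ¬ res.getD k "" < t := by
          intro k hk hklen hck
          exact hc (lt_of_le_of_lt (hmono ((lo + hi) / 2) k hk hklen) hck)
        have := ih ((lo + hi) / 2 - lo) (by omega) lo ((lo + hi) / 2) rfl (by omega) (by omega) hlo hnew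
        refine ⟨this.1, by omega, this.2.2.1, this.2.2.2⟩
    · rw [dif_neg h]
      exact ⟨le_refl _, by omega, fun k hk => hlo k hk, fun k hk hklen => hhi2 k (by omega) hklen⟩

lemma pv_insert_spec (res : List String) (token : String) (hsort : res.Pairwise (· < ·)) :
    (pvInsert res token).Pairwise (· < ·) ∧
      ∀ y, y ∈ pvInsert res token ↔ y ∈ res ∨ (PySem.Str.strip token ≠ "" ∧ y = PySem.Str.strip token) := by
  unfold pvInsert
  by_cases ht : PySem.Str.strip token = ""
  · rw [if_pos ht]
    exact ⟨hsort, fun y => by tauto⟩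
  · rw [if_neg ht]
    simp only []
    set t := PySem.Str.strip token with htdef
    obtain ⟨h1, h2, h3, h4⟩ := pv_bs_spec res t hsort (res.length - 0) 0 res.length rfl (by omega)
      (le_refl _) (by omega) (fun k hk hklen => by omega)
    set lo := pvBS res t 0 res.length with hlodef
    by_cases hdup : lo < res.length ∧ res.getD lo "" = t
    · rw [if_pos hdup]
      refine ⟨hsort, fun y => ?_⟩
      constructor
      · tauto
      · rintro (h | ⟨-, rfl⟩)
        · exact h
        · rw [← hdup.2]
          rw [List.getD_eq_getElem res "" hdup.1]
          exact List.getElem_mem _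
    · rw [if_neg hdup]
      have htlt : ∀ k, lo ≤ k → k < res.length → t < res.getD k "" := by
        intro k hk hklen
        have hne : res.getD lo "" ≠ t := by
          intro he
          exact hdup ⟨by omega, he⟩
        have hlole : ¬ res.getD lo "" < t := h4 lo (le_refl _) (by omega)
        have : t < res.getD lo "" := lt_of_le_of_ne (not_lt.mp hlole) (Ne.symm hne)
        rcases eq_or_lt_of_le hk with rfl | hlt
        · exact this
        · refine lt_of_lt_of_le this ?_
          rcases eq_or_lt_of_le hk with he | hlt2
          · omega
          · have := List.pairwise_iff_getElem.mp hsort lo k (by omega) hklen hlt2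
            rw [List.getD_eq_getElem res "" (by omega), List.getD_eq_getElem res "" hklen]
            exact le_of_lt this
      constructor
      · rw [show res.take lo ++ t :: res.drop lo = res.take lo ++ [t] ++ res.drop lo from by simp]
        rw [List.pairwise_append, List.pairwise_append]
        refine ⟨⟨hsort.sublist (List.take_sublist lo res), by simp, ?_⟩,
          hsort.sublist (List.drop_sublist lo res), ?_⟩
        · intro a ha b hb
          simp at hb
          subst hb
          obtain ⟨k, hk, hget⟩ := List.mem_take_iff_getElem.mp ha
          rw [← hget, ← List.getD_eq_getElem res "" (by omega)]
          exact h3 k (by omega)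
        · intro a ha b hb
          obtain ⟨k, hk, hget⟩ := List.mem_drop_iff_getElem.mp hb
          have hbval : t < b := by
            rw [← hget, ← List.getD_eq_getElem res "" (by omega)]
            exact htlt (lo + k) (by omega) (by omega)
          rcases List.mem_append.mp ha with ha' | ha'
          · obtain ⟨j, hj, hget'⟩ := List.mem_take_iff_getElem.mp ha'
            refine lt_trans ?_ hbval
            rw [← hget', ← List.getD_eq_getElem res "" (by omega)]
            exact h3 j (by omega)
          · simp at ha'
            subst ha'
            exact hbval
      · intro y
        have hres : y ∈ res ↔ y ∈ res.take lo ∨ y ∈ res.drop lo := by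
          conv_lhs => rw [← List.take_append_drop lo res]
          exact List.mem_append
        simp only [List.mem_append, List.mem_cons, hres]
        constructor
        · rintro (h | rfl | h)
          · exact Or.inl (Or.inl h)
          · exact Or.inr ⟨ht, rfl⟩
          · exact Or.inl (Or.inr h)
        · rintro ((h | h) | ⟨-, rfl⟩)
          · exact Or.inl h
          · exact Or.inr (Or.inr h)
          · exact Or.inr (Or.inl rfl)

lemma pv_fold_insert (L : List String) : ∀ (acc : List String), acc.Pairwise (· < ·) →
    (L.foldl pvInsert acc).Pairwise (· < ·) ∧
      ∀ y, y ∈ L.foldl pvInsert acc ↔ y ∈ acc ∨ ∃ x ∈ L, PySem.Str.strip x ≠ "" ∧ y = PySem.Str.strip x := by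
  induction L with
  | nil => exact fun acc h => ⟨h, fun y => by simp⟩
  | cons x L ih =>
    intro acc hacc
    obtain ⟨hp, hm⟩ := pv_insert_spec acc x hacc
    obtain ⟨hp', hm'⟩ := ih (pvInsert acc x) hp
    refine ⟨hp', fun y => ?_⟩
    rw [List.foldl_cons] at *
    rw [hm' y, hm y]
    simp only [List.mem_cons]
    constructor
    · rintro ((h | ⟨h1, h2⟩) | ⟨z, hz, h1, h2⟩)
      · exact Or.inl h
      · exact Or.inr ⟨x, Or.inl rfl, h1, h2⟩
      · exact Or.inr ⟨z, Or.inr hz, h1, h2⟩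
    · rintro (h | ⟨z, (rfl | hz), h1, h2⟩)
      · exact Or.inl (Or.inl h)
      · exact Or.inl (Or.inr ⟨h1, h2⟩)
      · exact Or.inr ⟨z, hz, h1, h2⟩

-- A's per-group set updates collapse to one Set.update by the flattened item list
lemma pv_foldl_update (q : String → List String) (gs : List String) (s : PySem.Set String) :
    gs.foldl (fun s g => PySem.Set.update s (q g)) s = PySem.Set.update s (gs.flatMap q) := by
  induction gs generalizing s with
  | nil => simp [PySem.Set.update]
  | cons g gs ih =>
      simp only [List.foldl_cons, List.flatMap_cons, ih]
      simp [PySem.Set.update, List.foldl_append]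

lemma pv_A_set (gs : List String) (q : String → List String) :
    (gs.foldl (fun (s : PySem.Set String) (g : String) =>
        PySem.Set.update s (((q g).map PySem.Str.strip).filter (fun t => t ≠ ""))) PySem.Set.empty)
      = PySem.Set.ofList (((gs.flatMap q).map PySem.Str.strip).filter (fun t => t ≠ "")) := by
  rw [pv_foldl_update (fun g => ((q g).map PySem.Str.strip).filter (fun t => t ≠ "")) gs PySem.Set.empty]
  rw [show (PySem.Set.empty : PySem.Set String) = [] from rfl, PySem.Set.update_nil_left]
  congr 1
  simp [List.map_flatMap, List.filter_flatMap]

-- core: sorted(set(F)) = fold of ordered insertion over the token list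
lemma pv_core (toks : List String) :
    PySem.List.sorted
      (PySem.Set.ofList ((toks.map PySem.Str.strip).filter (fun t => t ≠ "")))
      (fun x => x)
    = toks.foldl pvInsert [] := by
  obtain ⟨hp, hm⟩ := pv_fold_insert toks [] List.Pairwise.nil
  apply PySem.List.sorted_eq_of_perm_of_pairwise_lt
  · rw [List.perm_ext_iff_of_nodup (hp.imp ne_of_lt) (PySem.Set.nodup_ofList _)]
    intro y
    rw [hm y, PySem.Set.mem_ofList]
    simp only [List.mem_filter, List.mem_map, List.mem_nil_iff, false_or]
    constructor
    · rintro ⟨x, hx, h1, rfl⟩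
      exact ⟨⟨x, hx, rfl⟩, by simpa using h1⟩
    · rintro ⟨⟨x, hx, rfl⟩, h1⟩
      exact ⟨x, hx, by simpa using h1, rfl⟩
  · exact hp

lemma pv_main (ks : String) (sc : List String)
    (h0 : PySem.List.pyGetD sc 0 "" ≠ "") (h1 : 1 < sc.length → PySem.List.pyGetD sc 1 "" ≠ "") :
    PySem.List.sorted
      (((PySem.Str.split? ks (PySem.List.pyGetD sc 0 "")).getD []).foldl
        (fun (s : PySem.Set String) (g : String) =>
          PySem.Set.update s
            (((if 1 < sc.length
                then (PySem.Str.split? g (PySem.List.pyGetD sc 1 "")).getD []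
                else [g]).map PySem.Str.strip).filter (fun t => t ≠ ""))) PySem.Set.empty)
      (fun x => x)
    = pvScanOuter (PySem.List.pyGetD sc 0 "").toList
        (if 1 < sc.length then some (PySem.List.pyGetD sc 1 "").toList else none)
        (ks.toList.length + 1) ks.toList [] := by
  have hs0 : (PySem.List.pyGetD sc 0 "").toList ≠ [] := fun h => h0 (String.toList_eq_nil_iff.mp h)
  have hsplit0 : (PySem.Str.split? ks (PySem.List.pyGetD sc 0 "")).getD []
      = (PySem.Chars.splitOn ks.toList (PySem.List.pyGetD sc 0 "").toList).map String.ofList := by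
    simp [PySem.Str.split?, PySem.Chars.split?, hs0]
  by_cases hlen : 1 < sc.length
  · have hs1 : (PySem.List.pyGetD sc 1 "").toList ≠ [] := fun h => h1 hlen (String.toList_eq_nil_iff.mp h)
    rw [if_pos hlen]
    conv_lhs =>
      rw [hsplit0]
      rw [pv_A_set _ (fun g => if 1 < sc.length
            then (PySem.Str.split? g (PySem.List.pyGetD sc 1 "")).getD [] else [g])]
    rw [pv_scanOuter_eq _ _ hs0 _ _ rfl _ _ (by omega)]
    have hstep : ∀ (r : List String) (g : List Char),
        pvScanInner (PySem.List.pyGetD sc 1 "").toList (g.length + 1) g r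
          = ((PySem.Chars.splitOn g (PySem.List.pyGetD sc 1 "").toList).map String.ofList).foldl pvInsert r := by
      intro r g
      rw [pv_scanInner_eq _ hs1 _ _ rfl _ _ (by omega), List.foldl_map]
    have hflat : ((PySem.Chars.splitOn ks.toList (PySem.List.pyGetD sc 0 "").toList).map String.ofList).flatMap
          (fun g => if 1 < sc.length then (PySem.Str.split? g (PySem.List.pyGetD sc 1 "")).getD [] else [g])
        = (PySem.Chars.splitOn ks.toList (PySem.List.pyGetD sc 0 "").toList).flatMap
          (fun t => (PySem.Chars.splitOn t (PySem.List.pyGetD sc 1 "").toList).map String.ofList) := by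
      rw [List.flatMap_map]
      apply List.flatMap_congr  -- maybe name differs
      intro t _
      rw [if_pos hlen]
      simp [PySem.Str.split?, PySem.Chars.split?, hs1]
    rw [hflat, pv_core, List.foldl_flatMap]
    simp only [hstep]
  · rw [if_neg hlen]
    conv_lhs =>
      rw [hsplit0]
      rw [pv_A_set _ (fun g => if 1 < sc.length
            then (PySem.Str.split? g (PySem.List.pyGetD sc 1 "")).getD [] else [g])]
    rw [pv_scanOuter_eq _ _ hs0 _ _ rfl _ _ (by omega)]
    have hflat : ((PySem.Chars.splitOn ks.toList (PySem.List.pyGetD sc 0 "").toList).map String.ofList).flatMap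
          (fun g => if 1 < sc.length then (PySem.Str.split? g (PySem.List.pyGetD sc 1 "")).getD [] else [g])
        = (PySem.Chars.splitOn ks.toList (PySem.List.pyGetD sc 0 "").toList).map String.ofList := by
      simp [hlen]
    rw [hflat, pv_core, List.foldl_map]

-- ===== VERDICT (by name: the statement is the Claim_ definition above) =====
theorem convert_keywords_to_list_spec : Claim_equal_convert_keywords_to_list := by
  intro keywords_str custom_config _ hpre
  obtain ⟨-, h0, h1⟩ := hpre
  exact pv_main keywords_str
    ((pvCfgSplitChars (if custom_config.isEmpty then [] else custom_config)).getD [])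
    (by simpa [PySem.List.pyGetD_ofNat'] using h0) (fun h => by simpa [PySem.List.pyGetD_ofNat'] using h1 h)
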